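-- pv_equiv track=rewrite | github.com/brycewang-stanford/StatsPAI | src/statspai/output/modelsummary.py | _collect_variables
-- ===== SOURCE A (Python) =====
-- from typing import Optional, List, Dict, Any, Union, Sequence
--
-- def _collect_variables(
--     coef_data: List[Dict[str, tuple]],
--     coef_map: Optional[Dict[str, str]],
-- ) -> List[str]:
--     """Collect and order variable names across models."""
--     seen = {}  # var → first appearance order
--     for cd in coef_data:
--         for var in cd:
--             if var not in seen:
--                 seen[var] = len(seen)
--
--     if coef_map:
--         # Reorder: mapped variables first (in map order), then remainder
--         ordered = []
--         for old_name in coef_map: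
--             if old_name in seen and coef_map[old_name] is not None:
--                 ordered.append(old_name)
--         for var in sorted(seen, key=seen.get):
--             if var not in ordered:
--                 if coef_map is None or var not in coef_map or coef_map[var] is not None:
--                     ordered.append(var)
--         return ordered
--     else:
--         return sorted(seen, key=seen.get)
-- ===== SOURCE B (Python) =====
-- def _collect_variables(coef_data, coef_map):
--     """Collect and order variable names across models."""
--     # unique variables in first-appearance order, one pass
--     appearance = list(dict.fromkeys(var for cd in coef_data for var in cd))
--     if not coef_map:
--         return appearance
--     rank = {name: i for i, name in enumerate(coef_map)}
--     pos = {var: i for i, var in enumerate(appearance)}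
--     n = len(coef_map)
--     keep = [v for v in appearance if coef_map.get(v, 1) is not None]
--     return sorted(keep, key=lambda v: rank[v] if v in coef_map else n + pos[v])
-- ===== Notes on version B (the rewrite author's own statement) =====
-- stated objective: alternative
-- what changed: A's quadratic two-phase reordering (two append loops with a membership test against the growing output list) is replaced by one dedup pass over coef_data plus a single stable sort of the appearance list under an integer key built from two precomputed position tables (rank in coef_map, first-appearance position), after filtering out variables mapped to None.
import Mathlib
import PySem

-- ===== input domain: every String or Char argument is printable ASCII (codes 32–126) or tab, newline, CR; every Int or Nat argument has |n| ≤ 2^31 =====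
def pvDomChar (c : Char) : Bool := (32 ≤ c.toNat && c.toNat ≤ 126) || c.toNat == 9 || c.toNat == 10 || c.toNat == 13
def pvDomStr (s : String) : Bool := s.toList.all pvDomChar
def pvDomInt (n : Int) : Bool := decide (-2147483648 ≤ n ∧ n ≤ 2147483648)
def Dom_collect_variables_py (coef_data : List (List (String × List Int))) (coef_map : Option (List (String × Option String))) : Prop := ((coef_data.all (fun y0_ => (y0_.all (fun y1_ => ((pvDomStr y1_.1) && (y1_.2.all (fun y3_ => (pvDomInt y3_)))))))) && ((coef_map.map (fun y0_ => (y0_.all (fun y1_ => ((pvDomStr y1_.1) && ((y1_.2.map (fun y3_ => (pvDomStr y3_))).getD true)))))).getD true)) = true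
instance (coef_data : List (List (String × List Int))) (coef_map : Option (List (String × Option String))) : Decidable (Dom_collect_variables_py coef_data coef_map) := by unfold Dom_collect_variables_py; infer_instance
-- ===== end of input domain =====

-- B replaces A's two-phase reordering (two append loops, with a membership test against the
-- growing output list) by a dedup pass plus one stable sort of the appearance list under a
-- single integer key built from two position tables (rank in coef_map / first-appearance
-- position); return values are proved identical on every input.

-- ===== PORT A =====
-- literal port of A: seen is a dict var → first-appearance order; iterating a Python dict
-- iterates its (distinct) keys, ported as (PySem.Dict.ofList cd).keys; sorted(seen, key=seen.get)
-- is ported with key seen.getD · 0, exact here since every sorted element is a key of seen.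
def collect_variables_py (coef_data : List (List (String × List Int))) (coef_map : Option (List (String × Option String))) : List String :=
  let seen : PySem.Dict String Int :=
    coef_data.foldl (fun seen cd =>
      ((PySem.Dict.ofList cd).keys).foldl (fun s var =>
        if s.contains var then s else s.insert var (s.size : Int)) seen)
      PySem.Dict.empty
  match coef_map with
  | none => PySem.List.sorted seen.keys (fun v => seen.getD v 0) false
  | some m =>
    let cmd : PySem.Dict String (Option String) := PySem.Dict.ofList m
    if cmd.size = 0 then PySem.List.sorted seen.keys (fun v => seen.getD v 0) false
    else
      let ordered : List String := cmd.keys.foldl (fun ordered old_name =>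
        if seen.contains old_name && ((cmd.get? old_name).getD none).isSome
        then ordered ++ [old_name] else ordered) []
      (PySem.List.sorted seen.keys (fun v => seen.getD v 0) false).foldl
        (fun ordered var =>
          if ordered.contains var then ordered
          else if !cmd.contains var || ((cmd.get? var).getD none).isSome
          then ordered ++ [var] else ordered) ordered

-- ===== PORT B =====
-- {x: i for i, x in enumerate(l)} : position table of a list
def pvPosDict (l : List String) : PySem.Dict String Int :=
  (PySem.List.enumerate l).foldl (fun d p => d.insert p.2 p.1) PySem.Dict.empty

-- literal port of B (Source B): dedup in appearance order; coef_map.get(v, 1) is not None is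
-- ported with the non-None default (some "").
def collect_variables_py_alt (coef_data : List (List (String × List Int))) (coef_map : Option (List (String × Option String))) : List String :=
  let appearance : List String :=
    PySem.List.dedup (coef_data.flatMap (fun cd => (PySem.Dict.ofList cd).keys))
  match coef_map with
  | none => appearance
  | some m =>
    let cmd : PySem.Dict String (Option String) := PySem.Dict.ofList m
    if cmd.size = 0 then appearance
    else
      let rank := pvPosDict cmd.keys
      let pos := pvPosDict appearance
      let n : Int := cmd.size
      let keep := appearance.filter (fun v => ((cmd.get? v).getD (some "")).isSome)
      PySem.List.sorted keep
        (fun v => if cmd.contains v then rank.getD v 0 else n + pos.getD v 0) false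

-- ===== PRECONDITION & SPEC =====
def Spec_collect_variables_py (coef_data : List (List (String × List Int))) (coef_map : Option (List (String × Option String))) (out : List String) : Prop := out = collect_variables_py_alt coef_data coef_map
instance (coef_data : List (List (String × List Int))) (coef_map : Option (List (String × Option String))) (out : List String) : Decidable (Spec_collect_variables_py coef_data coef_map out) := by unfold Spec_collect_variables_py; infer_instance

-- ===== CLAIM (what is proved, stated in full; the proofs are below) =====
def Claim_equal_collect_variables_py : Prop := ∀ (coef_data : List (List (String × List Int))) (coef_map : Option (List (String × Option String))), Dom_collect_variables_py coef_data coef_map → Spec_collect_variables_py coef_data coef_map (collect_variables_py coef_data coef_map)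

-- ===== LEMMAS AND PROOFS =====

theorem pvPosDict_items (l : List String) (hl : l.Nodup) :
    (pvPosDict l).items = (PySem.List.enumerate l).map (fun p => (p.2, p.1)) := by
  unfold pvPosDict
  have h := PySem.Dict.items_foldl_insert_fresh (d := (PySem.Dict.empty : PySem.Dict String Int))
    (l := PySem.List.enumerate l) (k := fun p => p.2) (v := fun p => p.1)
    (by intro a _; exact PySem.Dict.contains_empty _)
    (by rw [PySem.List.map_snd_enumerate]; exact hl)
  simpa using h

theorem pvPosDict_keys (l : List String) (hl : l.Nodup) : (pvPosDict l).keys = l := by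
  simp only [PySem.Dict.keys, pvPosDict_items l hl, List.map_map]
  have : ((fun (p : String × Int) => p.1) ∘ fun (p : Int × String) => (p.2, p.1)) = fun p => p.2 := rfl
  rw [this, PySem.List.map_snd_enumerate]

theorem pvPosDict_contains (l : List String) (hl : l.Nodup) (v : String) :
    (pvPosDict l).contains v = true ↔ v ∈ l := by
  rw [PySem.Dict.contains_iff_mem_keys, pvPosDict_keys l hl]

theorem pvPosDict_getD (l : List String) (hl : l.Nodup) (i : Nat) (hi : i < l.length) :
    (pvPosDict l).getD l[i] 0 = (i : Int) := by
  have hlen : i < (PySem.List.enumerate l 0).length := by rw [PySem.List.length_enumerate]; exact hi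
  have hmem : ((l[i] : String), (i : Int)) ∈ (pvPosDict l).items := by
    rw [pvPosDict_items l hl]
    refine List.mem_map.2 ⟨((i : Int), l[i]), ?_, rfl⟩
    have h := PySem.List.getElem_enumerate (xs := l) (s := 0) (k := i) hlen
    have : ((0 : Int) + i, l[i]) ∈ PySem.List.enumerate l 0 := h ▸ List.getElem_mem hlen
    simpa using this
  exact PySem.Dict.getD_of_mem_items _ hmem (by rw [pvPosDict_keys l hl]; exact hl) 0

theorem pvPosDict_getD_nonneg (l : List String) (hl : l.Nodup) (v : String) (hv : v ∈ l) :
    0 ≤ (pvPosDict l).getD v 0 := by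
  obtain ⟨i, hi, rfl⟩ := List.mem_iff_getElem.1 hv
  rw [pvPosDict_getD l hl i hi]; positivity

theorem pvPosDict_getD_lt (l : List String) (hl : l.Nodup) (v : String) (hv : v ∈ l) :
    (pvPosDict l).getD v 0 < (l.length : Int) := by
  obtain ⟨i, hi, rfl⟩ := List.mem_iff_getElem.1 hv
  rw [pvPosDict_getD l hl i hi]; exact_mod_cast hi

theorem pvPosDict_pairwise (l : List String) (hl : l.Nodup) :
    l.Pairwise (fun a b => (pvPosDict l).getD a 0 < (pvPosDict l).getD b 0) := by
  rw [List.pairwise_iff_getElem]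
  intro i j hi hj hij
  rw [pvPosDict_getD l hl i hi, pvPosDict_getD l hl j hj]
  exact_mod_cast hij

theorem pvPosDict_size (l : List String) (hl : l.Nodup) : (pvPosDict l).size = l.length := by
  show (pvPosDict l).items.length = l.length
  rw [pvPosDict_items l hl, List.length_map, PySem.List.length_enumerate]

theorem pvPosDict_snoc (s : List String) (x : String) (hs : (s ++ [x]).Nodup) :
    (pvPosDict s).insert x ((pvPosDict s).size : Int) = pvPosDict (s ++ [x]) := by
  have hs' : s.Nodup := (List.nodup_append.1 hs).1
  have hx : x ∉ s := by
    intro h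
    exact ((List.nodup_append.1 hs).2.2 x h x (by simp)) rfl
  apply PySem.Dict.ext
  rw [PySem.Dict.items_insert_of_not_contains _ _ (by
        rw [Bool.eq_false_iff]; intro h; exact hx ((pvPosDict_contains s hs' x).1 h)),
      pvPosDict_items s hs', pvPosDict_items _ hs, PySem.List.enumerate_append, List.map_append]
  simp [pvPosDict_size s hs', PySem.List.enumerate]

theorem pvSeen_step (xs : List String) : ∀ (s : List String), s.Nodup →
    xs.foldl (fun d var => if d.contains var then d else d.insert var (d.size : Int)) (pvPosDict s)
      = pvPosDict (PySem.Set.update s xs) := by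
  induction xs with
  | nil => intro s _; simp [PySem.Set.update_nil]
  | cons x t ih =>
    intro s hs
    rw [List.foldl_cons, PySem.Set.update_cons]
    by_cases hx : x ∈ s
    · have hc : (pvPosDict s).contains x = true := (pvPosDict_contains s hs x).2 hx
      have hadd : PySem.Set.add s x = s := by simp [PySem.Set.add, hx]
      rw [hc]; simp only [if_true, hadd]; exact ih s hs
    · have hc : (pvPosDict s).contains x = false := by
        rw [Bool.eq_false_iff]; intro h; exact hx ((pvPosDict_contains s hs x).1 h)
      have hadd : PySem.Set.add s x = s ++ [x] := by
        simp [PySem.Set.add, hx]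
      have hnd : (s ++ [x]).Nodup := by
        rw [List.nodup_append]; exact ⟨hs, List.nodup_singleton x, by intro a ha b hb; simp at hb; subst hb; exact fun h => hx (h ▸ ha)⟩
      rw [hc]; simp only [Bool.false_eq_true, if_false]
      rw [pvPosDict_snoc s x hnd, hadd]; exact ih _ hnd

theorem pvSeen_eq (coef_data : List (List (String × List Int))) :
    coef_data.foldl (fun seen cd =>
      ((PySem.Dict.ofList cd).keys).foldl (fun s var =>
        if s.contains var then s else s.insert var (s.size : Int)) seen)
      PySem.Dict.empty
    = pvPosDict (PySem.List.dedup (coef_data.flatMap (fun cd => (PySem.Dict.ofList cd).keys))) := by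
  have main : ∀ (L : List (List (String × List Int))) (s : List String), s.Nodup →
      L.foldl (fun seen cd =>
        ((PySem.Dict.ofList cd).keys).foldl (fun d var =>
          if d.contains var then d else d.insert var (d.size : Int)) seen)
        (pvPosDict s)
      = pvPosDict (PySem.Set.update s (L.flatMap (fun cd => (PySem.Dict.ofList cd).keys))) := by
    intro L
    induction L with
    | nil => intro s _; simp [PySem.Set.update_nil]
    | cons cd L ih =>
      intro s hs
      rw [List.foldl_cons, pvSeen_step _ s hs, List.flatMap_cons, PySem.Set.update_append]
      exact ih _ (PySem.Set.nodup_update s _ hs)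
  have h0 : (PySem.Dict.empty : PySem.Dict String Int) = pvPosDict [] := rfl
  rw [h0, main coef_data [] List.nodup_nil, PySem.Set.update_nil_left, PySem.List.dedup_eq_ofList]

theorem pvPhase2 (q : String → Bool) : ∀ (l : List String), l.Nodup →
    ∀ acc₀ : List String,
    l.foldl (fun acc v => if acc.contains v then acc
                          else if q v then acc ++ [v] else acc) acc₀
      = acc₀ ++ l.filter (fun v => !acc₀.contains v && q v) := by
  intro l
  induction l with
  | nil => intro _ acc₀; simp
  | cons x t ih =>
    intro hl acc₀
    have hx : x ∉ t := (List.nodup_cons.1 hl).1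
    have ht : t.Nodup := (List.nodup_cons.1 hl).2
    rw [List.foldl_cons, List.filter_cons]
    by_cases hm : x ∈ acc₀
    · have : acc₀.contains x = true := List.contains_iff_mem.2 hm
      rw [this]; simp only [if_true, Bool.not_true, Bool.false_and]
      simpa using ih ht acc₀
    · have hc : acc₀.contains x = false := by simpa using hm
      rw [hc]; simp only [Bool.false_eq_true, if_false, Bool.not_false, Bool.true_and]
      by_cases hq : q x = true
      · rw [hq]; simp only [if_true]
        rw [ih ht (acc₀ ++ [x])]
        rw [List.filter_congr (l := t) (p := fun v => !(acc₀ ++ [x]).contains v && q v)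
          (q := fun v => !acc₀.contains v && q v) ?_]
        · simp
        · intro v hv
          have hvx : v ≠ x := fun h => hx (h ▸ hv)
          simp [hvx]
      · have hq' : q x = false := by simpa using hq
        rw [hq']; simp only [Bool.false_eq_true, if_false]
        exact ih ht acc₀

theorem main_thm (coef_data : List (List (String × List Int))) (coef_map : Option (List (String × Option String))) :
    collect_variables_py coef_data coef_map = collect_variables_py_alt coef_data coef_map := by
  have hap : (PySem.List.dedup (coef_data.flatMap (fun cd => (PySem.Dict.ofList cd).keys))).Nodup :=
    PySem.List.nodup_dedup _
  set app := PySem.List.dedup (coef_data.flatMap (fun cd => (PySem.Dict.ofList cd).keys)) with happ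
  have hsortA : PySem.List.sorted app (fun v => (pvPosDict app).getD v 0) = app :=
    PySem.List.sorted_eq_self_of_pairwise _ _
      ((pvPosDict_pairwise app hap).imp le_of_lt)
  simp only [collect_variables_py, collect_variables_py_alt, pvSeen_eq, ← happ]
  cases coef_map with
  | none =>
    rw [pvPosDict_keys app hap, hsortA]
  | some m =>
    rw [pvPosDict_keys app hap, hsortA]
    by_cases hsz : (PySem.Dict.ofList m).size = 0
    · simp [hsz]
    · simp only [hsz, if_false]
      have hkeys : (PySem.Dict.ofList m).keys.Nodup := PySem.Dict.nodup_keys_ofList m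
      set cmd := PySem.Dict.ofList m with hcmd
      rw [PySem.List.foldl_append_if_eq_filter
            (p := fun k => (pvPosDict app).contains k && ((cmd.get? k).getD none).isSome), List.nil_append]
      set O1 := cmd.keys.filter (fun k => (pvPosDict app).contains k && ((cmd.get? k).getD none).isSome) with hO1
      rw [pvPhase2 (fun var => (!cmd.contains var || ((cmd.get? var).getD none).isSome)) app hap O1]
      -- membership facts
      have hO1mem : ∀ a, a ∈ O1 ↔ a ∈ cmd.keys ∧ a ∈ app ∧ ((cmd.get? a).getD none).isSome := by
        intro a
        rw [hO1, List.mem_filter, Bool.and_eq_true, pvPosDict_contains app hap a]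
      have hcont : ∀ a, cmd.contains a = true ↔ a ∈ cmd.keys := fun a => PySem.Dict.contains_iff_mem_keys cmd a
      have hmemkeys : ∀ a, a ∈ cmd.keys ↔ (cmd.get? a).isSome = true := by
        intro a
        constructor
        · intro h
          rcases hga : cmd.get? a with _ | w
          · exact absurd h ((PySem.Dict.get?_eq_none_iff_not_mem_keys cmd a).1 hga)
          · rfl
        · intro h
          by_contra hn
          rw [(PySem.Dict.get?_eq_none_iff_not_mem_keys cmd a).2 hn] at h
          simp at h
      have hOc : ∀ v ∈ app, O1.contains v = (cmd.contains v && ((cmd.get? v).getD none).isSome) := by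
        intro v hv
        rw [Bool.eq_iff_iff, List.contains_iff_mem, hO1mem v, Bool.and_eq_true, hcont v]
        tauto
      have hfilt : app.filter (fun v => !O1.contains v && (!cmd.contains v || ((cmd.get? v).getD none).isSome))
          = app.filter (fun v => !cmd.contains v) := by
        apply List.filter_congr
        intro v hv
        rw [hOc v hv]
        cases cmd.contains v <;> cases ((cmd.get? v).getD none).isSome <;> rfl
      rw [hfilt]
      set G2 := app.filter (fun v => !cmd.contains v) with hG2
      set keep := app.filter (fun v => ((cmd.get? v).getD (some "")).isSome) with hkeep
      set key : String → Int := fun v => if cmd.contains v = true then (pvPosDict cmd.keys).getD v 0 else ((cmd.size : Int)) + (pvPosDict app).getD v 0 with hkey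
      have ndO1 : O1.Nodup := hkeys.filter _
      have ndG2 : G2.Nodup := hap.filter _
      have hG2mem : ∀ a, a ∈ G2 ↔ a ∈ app ∧ cmd.contains a = false := by
        intro a
        rw [hG2, List.mem_filter]
        simp
      have ndT : (O1 ++ G2).Nodup := by
        rw [List.nodup_append]
        refine ⟨ndO1, ndG2, ?_⟩
        intro a ha b hb hab
        subst hab
        have h1 := (hcont a).2 ((hO1mem a).1 ha).1
        have h2 := ((hG2mem a).1 hb).2
        rw [h1] at h2
        simp at h2
      have ndKeep : keep.Nodup := hap.filter _
      have hperm : (O1 ++ G2).Perm keep := by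
        rw [List.perm_ext_iff_of_nodup ndT ndKeep]
        intro a
        rw [List.mem_append, hO1mem a, hG2mem a, hkeep, List.mem_filter]
        rcases hga : cmd.get? a with _ | w
        · have hna : a ∉ cmd.keys := (PySem.Dict.get?_eq_none_iff_not_mem_keys cmd a).1 hga
          have hca : cmd.contains a = false := by
            rw [Bool.eq_false_iff]; intro h; exact hna ((hcont a).1 h)
          simp [hca, hna]
        · have hma : a ∈ cmd.keys := (hmemkeys a).2 (by rw [hga]; rfl)
          have hca : cmd.contains a = true := (hcont a).2 hma
          simp only [hca, hma, true_and, Option.getD_some]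
          tauto
      have hsizeInt : ((cmd.size : Int)) = (cmd.keys.length : Int) := by
        simp [PySem.Dict.size, PySem.Dict.keys]
      have pwO1 : O1.Pairwise (fun a b => key a < key b) := by
        refine List.Pairwise.imp_of_mem ?_
          ((pvPosDict_pairwise cmd.keys hkeys).sublist List.filter_sublist)
        intro a b ha hb hlt
        have hca : cmd.contains a = true := (hcont a).2 ((hO1mem a).1 ha).1
        have hcb : cmd.contains b = true := (hcont b).2 ((hO1mem b).1 hb).1
        rw [hkey]
        simp only [hca, hcb, if_true]
        exact hlt
      have pwG2 : G2.Pairwise (fun a b => key a < key b) := by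
        refine List.Pairwise.imp_of_mem ?_
          ((pvPosDict_pairwise app hap).sublist List.filter_sublist)
        intro a b ha hb hlt
        have hca : cmd.contains a = false := ((hG2mem a).1 ha).2
        have hcb : cmd.contains b = false := ((hG2mem b).1 hb).2
        rw [hkey]
        simp only [hca, hcb, Bool.false_eq_true, if_false]
        omega
      have pwT : (O1 ++ G2).Pairwise (fun a b => key a < key b) := by
        rw [List.pairwise_append]
        refine ⟨pwO1, pwG2, ?_⟩
        intro a ha b hb
        have hma : a ∈ cmd.keys := ((hO1mem a).1 ha).1
        have hca : cmd.contains a = true := (hcont a).2 hma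
        have hcb : cmd.contains b = false := ((hG2mem b).1 hb).2
        have hbapp : b ∈ app := ((hG2mem b).1 hb).1
        have h1 : (pvPosDict cmd.keys).getD a 0 < (cmd.keys.length : Int) :=
          pvPosDict_getD_lt cmd.keys hkeys a hma
        have h2 : 0 ≤ (pvPosDict app).getD b 0 := pvPosDict_getD_nonneg app hap b hbapp
        rw [hkey]
        simp only [hca, hcb, if_true, Bool.false_eq_true, if_false]
        rw [hsizeInt]
        omega
      rw [PySem.List.sorted_eq_of_perm_of_pairwise_lt keep (O1 ++ G2) key hperm pwT]

-- ===== VERDICT (by name: the statement is the Claim_ definition above) =====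
theorem collect_variables_py_spec : Claim_equal_collect_variables_py := by
  intro coef_data coef_map _
  unfold Spec_collect_variables_py
  exact main_thm coef_data coef_map
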